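-- pv_equiv track=rewrite | github.com/GutesBrot/AdventOfCode2024 | 10/D10.py | calculate_trailhead_scores
-- ===== SOURCE A (Python) =====
-- def is_valid_move(height, current_height):
--     """Checks if the move is valid based on the height constraint."""
--     return height == current_height + 1
--
-- def dfs(map_data, x, y, current_height, visited):
--     """Performs a depth-first search to find all reachable 9s from a trailhead."""
--     if (x, y) in visited:
--         return 0
--     visited.add((x, y))
--
--     rows, cols = len(map_data), len(map_data[0])
--     if map_data[x][y] == 9:
--         return 1  # Reached a 9
--
--     score = 0
--     # Explore up, down, left, and right
--     for dx, dy in [(-1, 0), (1, 0), (0, -1), (0, 1)]: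
--         nx, ny = x + dx, y + dy
--         if 0 <= nx < rows and 0 <= ny < cols and is_valid_move(map_data[nx][ny], current_height):
--             score += dfs(map_data, nx, ny, map_data[nx][ny], visited)
--
--     return score
--
-- def calculate_trailhead_scores(map_data):
--     """Calculates the score for each trailhead and returns the total score."""
--     rows, cols = len(map_data), len(map_data[0])
--     total_score = 0
--
--     for x in range(rows):
--         for y in range(cols):
--             if map_data[x][y] == 0:  # Trailhead
--                 visited = set()
--                 total_score += dfs(map_data, x, y, 0, visited)
--
--     return total_score
-- ===== SOURCE B (Python) =====
-- def calculate_trailhead_scores(map_data):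
--     """Calculates the score for each trailhead and returns the total score."""
--     rows, cols = len(map_data), len(map_data[0])
--     total_score = 0
--     for x in range(rows):
--         for y in range(cols):
--             if map_data[x][y] == 0:  # Trailhead
--                 frontier = {(x, y)}
--                 for h in range(1, 10):
--                     frontier = {(nx, ny)
--                                 for (cx, cy) in frontier
--                                 for (nx, ny) in ((cx - 1, cy), (cx + 1, cy), (cx, cy - 1), (cx, cy + 1))
--                                 if 0 <= nx < rows and 0 <= ny < cols and map_data[nx][ny] == h}
--                 total_score += len(frontier)
--     return total_score
-- ===== Notes on version B (the rewrite author's own statement) =====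
-- stated objective: alternative
-- what changed: Replaces the per-trailhead recursive DFS with a shared mutated visited set by a per-trailhead iterative level-synchronous frontier search: for h = 1..9 the frontier becomes the set of in-bounds neighbours of the current frontier whose height is exactly h, and the trailhead's score is the size of the final height-9 frontier.
import Mathlib
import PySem

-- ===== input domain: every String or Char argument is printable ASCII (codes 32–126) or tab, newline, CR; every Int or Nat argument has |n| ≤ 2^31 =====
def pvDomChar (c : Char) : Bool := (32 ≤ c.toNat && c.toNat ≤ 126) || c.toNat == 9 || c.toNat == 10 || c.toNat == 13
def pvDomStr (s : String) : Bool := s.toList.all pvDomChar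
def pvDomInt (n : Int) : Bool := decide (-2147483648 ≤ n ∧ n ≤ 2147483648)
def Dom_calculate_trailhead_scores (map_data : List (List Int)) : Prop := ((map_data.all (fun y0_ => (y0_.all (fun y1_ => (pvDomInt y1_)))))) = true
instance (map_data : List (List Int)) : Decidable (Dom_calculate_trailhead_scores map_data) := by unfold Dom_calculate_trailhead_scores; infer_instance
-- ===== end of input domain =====

-- B replaces A's per-trailhead recursive DFS with a visited set by a per-trailhead
-- level-synchronous frontier search (set of cells at height h for h = 1..9); return values agree.

-- ===== PORT A =====
def pvDirs : List (Int × Int) := [(-1, 0), (1, 0), (0, -1), (0, 1)]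

def is_valid_move (height current_height : Int) : Bool := height == current_height + 1

-- map_data[x][y]; exact under Pre_ (index in range) wherever A evaluates it
def pvCell (m : List (List Int)) (x y : Int) : Int :=
  PySem.List.pyGetD (PySem.List.pyGetD m x []) y 0

-- dfs, with the mutated 'visited' threaded through; fuel only makes the recursion
-- structural (11 is never exhausted: heights along a path go 0,1,…,9)
def pvDfs (m : List (List Int)) : Nat → Int → Int → Int → List (Int × Int) → Int × List (Int × Int)
  | 0, _, _, _, v => (0, v)
  | fuel + 1, x, y, ch, v =>
    if (x, y) ∈ v then (0, v)
    else
      let v1 := PySem.Set.add v (x, y)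
      let rows : Int := PySem.List.len m
      let cols : Int := PySem.List.len (PySem.List.pyGetD m 0 [])
      if pvCell m x y == 9 then (1, v1)
      else
        pvDirs.foldl
          (fun acc d =>
            let nx := x + d.1
            let ny := y + d.2
            if 0 ≤ nx ∧ nx < rows ∧ 0 ≤ ny ∧ ny < cols ∧ is_valid_move (pvCell m nx ny) ch = true then
              let r := pvDfs m fuel nx ny (pvCell m nx ny) acc.2
              (acc.1 + r.1, r.2)
            else acc)
          (0, v1)

def calculate_trailhead_scores (map_data : List (List Int)) : Int :=
  let rows : Int := PySem.List.len map_data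
  let cols : Int := PySem.List.len (PySem.List.pyGetD map_data 0 [])
  (PySem.List.pyRange 0 rows 1).foldl
    (fun total x =>
      (PySem.List.pyRange 0 cols 1).foldl
        (fun total y =>
          if pvCell map_data x y == 0 then
            total + (pvDfs map_data 11 x y 0 PySem.Set.empty).1
          else total)
        total)
    0

-- ===== PORT B =====
def pvNbrs (p : Int × Int) : List (Int × Int) :=
  [(p.1 - 1, p.2), (p.1 + 1, p.2), (p.1, p.2 - 1), (p.1, p.2 + 1)]

-- one step of the frontier: the set of in-bounds neighbours of f whose height is h
def pvStep (m : List (List Int)) (rows cols h : Int) (f : List (Int × Int)) : List (Int × Int) :=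
  PySem.Set.ofList (f.flatMap (fun c =>
    (pvNbrs c).filter (fun q =>
      decide (0 ≤ q.1) && decide (q.1 < rows) && decide (0 ≤ q.2) && decide (q.2 < cols) &&
        (pvCell m q.1 q.2 == h))))

def calculate_trailhead_scores_alt (map_data : List (List Int)) : Int :=
  let rows : Int := PySem.List.len map_data
  let cols : Int := PySem.List.len (PySem.List.pyGetD map_data 0 [])
  (PySem.List.pyRange 0 rows 1).foldl
    (fun total x =>
      (PySem.List.pyRange 0 cols 1).foldl
        (fun total y =>
          if pvCell map_data x y == 0 then
            total + (((PySem.List.pyRange 1 10 1).foldl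
              (fun f h => pvStep map_data rows cols h f)
              (PySem.Set.ofList [(x, y)])).length : Int)
          else total)
        total)
    0

-- ===== PRECONDITION & SPEC =====
-- Pre_ excludes exactly the inputs on which Python A raises IndexError: the empty map
-- (len(map_data[0])) and maps with a row shorter than row 0 (every cell of the first
-- len(map_data[0]) columns is read by the trailhead scan).
def Pre_calculate_trailhead_scores (map_data : List (List Int)) : Prop :=
  map_data ≠ [] ∧ ∀ row ∈ map_data, (map_data.headD []).length ≤ row.length
instance (map_data : List (List Int)) : Decidable (Pre_calculate_trailhead_scores map_data) := by
  unfold Pre_calculate_trailhead_scores; infer_instance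

def pvWitness_calculate_trailhead_scores : List (List Int) := [[0, 1, 2], [1, 2, 9], [0, 3, 9]]

def Spec_calculate_trailhead_scores (map_data : List (List Int)) (out : Int) : Prop := out = calculate_trailhead_scores_alt map_data
instance (map_data : List (List Int)) (out : Int) : Decidable (Spec_calculate_trailhead_scores map_data out) := by unfold Spec_calculate_trailhead_scores; infer_instance

-- ===== CLAIM (what is proved, stated in full; the proofs are below) =====
def Claim_equal_calculate_trailhead_scores : Prop := ∀ (map_data : List (List Int)), Dom_calculate_trailhead_scores map_data → Pre_calculate_trailhead_scores map_data → Spec_calculate_trailhead_scores map_data (calculate_trailhead_scores map_data)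

-- ===== LEMMAS AND PROOFS =====

def rowsOf (m : List (List Int)) : Int := PySem.List.len m
def colsOf (m : List (List Int)) : Int := PySem.List.len (PySem.List.pyGetD m 0 [])

def pvInb (rows cols : Int) (q : Int × Int) : Prop :=
  0 ≤ q.1 ∧ q.1 < rows ∧ 0 ≤ q.2 ∧ q.2 < cols

def pvEdge (m : List (List Int)) (p q : Int × Int) : Prop :=
  pvCell m p.1 p.2 ≠ 9 ∧ q ∈ pvNbrs p ∧ pvInb (rowsOf m) (colsOf m) q ∧
    pvCell m q.1 q.2 = pvCell m p.1 p.2 + 1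

-- reachability from s by +1 steps avoiding the visited set v (A's dfs explores exactly this)
inductive pvAR (m : List (List Int)) (v : List (Int × Int)) : (Int × Int) → (Int × Int) → Prop
  | refl (p : Int × Int) (hp : p ∉ v) : pvAR m v p p
  | step {s p q : Int × Int} (h1 : pvAR m v s p) (h2 : pvEdge m p q) (h3 : q ∉ v) : pvAR m v s q

-- level-k reachability from s (B's frontier after k steps)
inductive pvLv (m : List (List Int)) (s : Int × Int) : Nat → (Int × Int) → Prop
  | zero : pvLv m s 0 s
  | succ {k : Nat} {p q : Int × Int} (h1 : pvLv m s k p) (h2 : q ∈ pvNbrs p)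
      (h3 : pvInb (rowsOf m) (colsOf m) q) (h4 : pvCell m q.1 q.2 = (k : Int) + 1) :
      pvLv m s (k + 1) q

theorem pvAR_start_not_mem {m v s c} (h : pvAR m v s c) : s ∉ v := by
  induction h with
  | refl hp => exact hp
  | step h1 h2 h3 ih => exact ih

theorem pvAR_target_not_mem {m v s c} (h : pvAR m v s c) : c ∉ v := by
  cases h with
  | refl hp => exact hp
  | step h1 h2 h3 => exact h3

theorem pvAR_mono {m v v' s c} (hsub : ∀ x, x ∈ v' → x ∈ v) (h : pvAR m v s c) : pvAR m v' s c := by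
  induction h with
  | refl hp => exact pvAR.refl _ (fun hx => hp (hsub _ hx))
  | step h1 h2 h3 ih => exact pvAR.step ih h2 (fun hx => h3 (hsub _ hx))

theorem pvAR_trans {m v s p c} (h1 : pvAR m v s p) (h2 : pvAR m v p c) : pvAR m v s c := by
  induction h2 with
  | refl hq => exact h1
  | step ha hb hc ih => exact pvAR.step ih hb hc

-- ===== A side: characterisation of dfs =====

-- the (zeta-reduced) loop body of pvDfs's direction fold, named for the proofs
def pvBody (m : List (List Int)) (fuel : Nat) (x y h : Int) :
    Int × List (Int × Int) → Int × Int → Int × List (Int × Int) := fun acc d =>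
  if 0 ≤ x + d.1 ∧ x + d.1 < PySem.List.len m ∧ 0 ≤ y + d.2 ∧
      y + d.2 < PySem.List.len (PySem.List.pyGetD m 0 []) ∧
      is_valid_move (pvCell m (x + d.1) (y + d.2)) h = true then
    (acc.1 + (pvDfs m fuel (x + d.1) (y + d.2) (pvCell m (x + d.1) (y + d.2)) acc.2).1,
      (pvDfs m fuel (x + d.1) (y + d.2) (pvCell m (x + d.1) (y + d.2)) acc.2).2)
  else acc

theorem mem_nbrs_dir {x y : Int} {q : Int × Int} (h : q ∈ pvNbrs (x, y)) :
    (q.1 - x, q.2 - y) ∈ pvDirs := by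
  simp only [pvNbrs, List.mem_cons, List.not_mem_nil, or_false] at h
  rcases h with rfl | rfl | rfl | rfl <;>
    simp [pvDirs, Prod.ext_iff]

theorem dir_mem_nbrs {x y : Int} {d : Int × Int} (h : d ∈ pvDirs) :
    (x + d.1, y + d.2) ∈ pvNbrs (x, y) := by
  simp only [pvDirs, List.mem_cons, List.not_mem_nil, or_false] at h
  rcases h with rfl | rfl | rfl | rfl <;>
    simp [pvNbrs, Prod.ext_iff] <;> omega

theorem pvAR_single {m : List (List Int)} {v : List (Int × Int)} {s : Int × Int}
    (h9 : pvCell m s.1 s.2 = 9) : ∀ c, pvAR m v s c → c = s := by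
  intro c h
  induction h with
  | refl hp => rfl
  | step h1 h2 h3 ih => subst ih; exact absurd h9 h2.1

theorem pvAR_closed {m : List (List Int)} {v : List (Int × Int)} {s : Int × Int}
    {R : List (Int × Int)} (hsR : s ∈ R)
    (hclose : ∀ p q, p ∈ R → pvEdge m p q → q ∉ v → q ∈ R) :
    ∀ c, pvAR m v s c → c ∈ R := by
  intro c h
  induction h with
  | refl hp => exact hsR
  | step h1 h2 h3 ih => exact hclose _ _ ih h2 h3

theorem pv_dir_eq {x y : Int} {q d : Int × Int} (hd1 : (q.1 - x, q.2 - y) = d) :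
    q = (x + d.1, y + d.2) := by
  have h1 : q.1 - x = d.1 := congrArg Prod.fst hd1
  have h2 : q.2 - y = d.2 := congrArg Prod.snd hd1
  rw [Prod.ext_iff]
  exact ⟨show q.1 = x + d.1 by omega, show q.2 = y + d.2 by omega⟩

-- the direction fold of dfs, with its invariant: u is the set of cells already collected
-- beyond (x, y); escapes from the region are only possible from (x, y) via a direction
-- still to be processed
theorem pvDfs_fold (m : List (List Int)) (fuel : Nat)
    (IH : ∀ (x y h : Int) (v : List (Int × Int)),
      pvCell m x y = h → h ≤ 9 → (9 - h).toNat < fuel →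
      ∃ w : List (Int × Int),
        pvDfs m fuel x y h v
          = (((w.filter (fun c => pvCell m c.1 c.2 == 9)).length : Int), v ++ w) ∧
        (∀ c, c ∈ w ↔ pvAR m v (x, y) c) ∧ w.Nodup)
    (x y h : Int) (v : List (Int × Int))
    (hv : (x, y) ∉ v) (hc : pvCell m x y = h) (hlt : h < 9) (hf : (9 - h).toNat < fuel + 1) :
    ∀ (ds : List (Int × Int)), (∀ d ∈ ds, d ∈ pvDirs) → ∀ (acc : Int) (u : List (Int × Int)),
    u.Nodup → (x, y) ∉ u → (∀ c ∈ u, c ∉ v) →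
    (∀ c ∈ u, pvAR m v (x, y) c) →
    (∀ p q, p ∈ (x, y) :: u → pvEdge m p q → q ∉ v → q ∉ (x, y) :: u →
      p = (x, y) ∧ (q.1 - x, q.2 - y) ∈ ds) →
    acc = ((u.filter (fun c => pvCell m c.1 c.2 == 9)).length : Int) →
    ∃ u' : List (Int × Int),
      List.foldl (pvBody m fuel x y h) (acc, (v ++ [(x, y)]) ++ u) ds
        = (((u'.filter (fun c => pvCell m c.1 c.2 == 9)).length : Int), (v ++ [(x, y)]) ++ u') ∧
      u'.Nodup ∧ (x, y) ∉ u' ∧ (∀ c ∈ u', c ∉ v) ∧ (∀ c ∈ u', pvAR m v (x, y) c) ∧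
      (∀ p q, p ∈ (x, y) :: u' → pvEdge m p q → q ∉ v → q ∈ (x, y) :: u') := by
  intro ds
  induction ds with
  | nil =>
    intro _ acc u hnd hxu huv harU hclose hacc
    refine ⟨u, by rw [hacc]; rfl, hnd, hxu, huv, harU, ?_⟩
    intro p q hp he hqv
    by_contra hq
    exact absurd (hclose p q hp he hqv hq).2 (List.not_mem_nil)
  | cons d ds' IHds =>
    intro hds acc u hnd hxu huv harU hclose hacc
    have hdmem : d ∈ pvDirs := hds d List.mem_cons_self
    rw [List.foldl_cons]
    by_cases hg : 0 ≤ x + d.1 ∧ x + d.1 < PySem.List.len m ∧ 0 ≤ y + d.2 ∧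
        y + d.2 < PySem.List.len (PySem.List.pyGetD m 0 []) ∧
        is_valid_move (pvCell m (x + d.1) (y + d.2)) h = true
    · -- guard holds: recurse into the neighbour
      have hvalid : pvCell m (x + d.1) (y + d.2) = h + 1 := by
        have := hg.2.2.2.2
        simpa [is_valid_move] using this
      obtain ⟨wb, heqb, hmemb, hndb⟩ :=
        IH (x + d.1) (y + d.2) (pvCell m (x + d.1) (y + d.2)) ((v ++ [(x, y)]) ++ u)
          rfl (by omega) (by rw [hvalid]; omega)
      have hfd : pvBody m fuel x y h (acc, (v ++ [(x, y)]) ++ u) d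
          = (acc + ((wb.filter (fun c => pvCell m c.1 c.2 == 9)).length : Int),
             (v ++ [(x, y)]) ++ (u ++ wb)) := by
        simp only [pvBody]
        rw [if_pos hg, heqb]
        simp [List.append_assoc]
      rw [hfd]
      -- facts about the cells wb collected by the recursive call
      have hb_edge : ∀ c ∈ wb, pvAR m v (x, y) c := by
        intro c hcw
        have hbAR := (hmemb c).1 hcw
        have hbni : (x + d.1, y + d.2) ∉ (v ++ [(x, y)]) ++ u := pvAR_start_not_mem hbAR
        have hbnv : (x + d.1, y + d.2) ∉ v := fun hx =>
          hbni (List.mem_append_left _ (List.mem_append_left _ hx))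
        have hARvb : pvAR m v (x + d.1, y + d.2) c :=
          pvAR_mono (fun z hz => List.mem_append_left _ (List.mem_append_left _ hz)) hbAR
        have hedge : pvEdge m (x, y) (x + d.1, y + d.2) := by
          refine ⟨by rw [hc]; omega, dir_mem_nbrs hdmem, ⟨hg.1, hg.2.1, hg.2.2.1, hg.2.2.2.1⟩, ?_⟩
          show pvCell m (x + d.1) (y + d.2) = pvCell m x y + 1
          rw [hvalid, hc]
        have hxyb : pvAR m v (x, y) (x + d.1, y + d.2) :=
          pvAR.step (pvAR.refl (x, y) hv) hedge hbnv
        exact pvAR_trans hxyb hARvb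
      have hwb_not : ∀ c ∈ wb, c ∉ (v ++ [(x, y)]) ++ u := fun c hcw =>
        pvAR_target_not_mem ((hmemb c).1 hcw)
      have hwb_nv : ∀ c ∈ wb, c ∉ v := fun c hcw hx =>
        hwb_not c hcw (List.mem_append_left _ (List.mem_append_left _ hx))
      have hwb_nxy : ∀ c ∈ wb, c ≠ (x, y) := fun c hcw hx =>
        hwb_not c hcw (List.mem_append_left _ (List.mem_append_right _ (by simp [hx])))
      have hwb_nu : ∀ c ∈ wb, c ∉ u := fun c hcw hx =>
        hwb_not c hcw (List.mem_append_right _ hx)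
      -- apply the induction hypothesis on the remaining directions with u ++ wb
      have hres := IHds (fun e he => hds e (List.mem_cons_of_mem _ he))
        (acc + ((wb.filter (fun c => pvCell m c.1 c.2 == 9)).length : Int)) (u ++ wb)
        (by
          refine List.Nodup.append hnd hndb ?_
          intro a ha hb; exact hwb_nu a hb ha)
        (by
          intro hx
          rcases List.mem_append.1 hx with h1 | h1
          · exact hxu h1
          · exact hwb_nxy _ h1 rfl)
        (by
          intro c hcm
          rcases List.mem_append.1 hcm with h1 | h1
          · exact huv c h1
          · exact hwb_nv c h1)
        (by
          intro c hcm
          rcases List.mem_append.1 hcm with h1 | h1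
          · exact harU c h1
          · exact hb_edge c h1)
        (by
          -- closure: escapes only from (x, y) via a not-yet-processed direction
          intro p q hp he hqv hq
          have hqne : q ≠ (x, y) := fun hx => hq (hx ▸ List.mem_cons_self)
          have hqnu : q ∉ u := fun hx => hq (List.mem_cons_of_mem _ (List.mem_append_left _ hx))
          have hqnwb : q ∉ wb := fun hx => hq (List.mem_cons_of_mem _ (List.mem_append_right _ hx))
          have hqnV : q ∉ (v ++ [(x, y)]) ++ u := by
            intro hx
            rcases List.mem_append.1 hx with h1 | h1
            · rcases List.mem_append.1 h1 with h2 | h2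
              · exact hqv h2
              · exact hqne (by simpa using h2)
            · exact hqnu h1
          rcases List.mem_cons.1 hp with hp1 | hp1
          · -- p is (x, y) or in the old region: use the old closure
            have hold := hclose p q (by simp [hp1]) he hqv
              (by
                intro hx
                rcases List.mem_cons.1 hx with h1 | h1
                · exact hqne h1
                · exact hqnu h1)
            rcases List.mem_cons.1 hold.2 with hd1 | hd1
            · -- the escape direction is d itself: but then q was collected into wb
              exfalso
              have hqb : q = (x + d.1, y + d.2) := pv_dir_eq hd1
              exact hqnwb ((hmemb q).2 (by rw [hqb] at hqnV ⊢; exact pvAR.refl _ hqnV))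
            · exact ⟨hold.1, hd1⟩
          · rcases List.mem_append.1 hp1 with h1 | h1
            · -- p in old u: old closure says p must be (x, y): contradiction with Nodup? handle via hclose
              have hold := hclose p q (List.mem_cons_of_mem _ h1) he hqv
                (by
                  intro hx
                  rcases List.mem_cons.1 hx with h2 | h2
                  · exact hqne h2
                  · exact hqnu h2)
              rcases List.mem_cons.1 hold.2 with hd1 | hd1
              · exfalso
                have hqb : q = (x + d.1, y + d.2) := pv_dir_eq hd1
                exact hqnwb ((hmemb q).2 (by rw [hqb] at hqnV ⊢; exact pvAR.refl _ hqnV))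
              · exact ⟨hold.1, hd1⟩
            · -- p in wb: the recursive call's region is edge-closed, so q ∈ wb: contradiction
              exfalso
              have hARq : pvAR m ((v ++ [(x, y)]) ++ u) (x + d.1, y + d.2) q :=
                pvAR.step ((hmemb p).1 h1) he hqnV
              exact hqnwb ((hmemb q).2 hARq)
        )
        (by
          rw [hacc, List.filter_append, List.length_append]
          push_cast; ring)
      exact hres
    · -- guard fails: nothing happens for this direction
      have hfd : pvBody m fuel x y h (acc, (v ++ [(x, y)]) ++ u) d
          = (acc, (v ++ [(x, y)]) ++ u) := by
        simp only [pvBody]; rw [if_neg hg]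
      rw [hfd]
      refine IHds (fun e he => hds e (List.mem_cons_of_mem _ he)) acc u hnd hxu huv harU ?_ hacc
      intro p q hp he hqv hq
      obtain ⟨hpx, hdir⟩ := hclose p q hp he hqv hq
      refine ⟨hpx, ?_⟩
      rcases List.mem_cons.1 hdir with hd1 | hd1
      · -- direction d would have to pass the guard: contradiction with hg
        exfalso
        subst hpx
        obtain ⟨hne9, hnq, hinb, hcq⟩ := he
        have hqb : q = (x + d.1, y + d.2) := pv_dir_eq hd1
        apply hg
        subst hqb
        obtain ⟨b1, b2, b3, b4⟩ := hinb
        refine ⟨b1, b2, b3, b4, ?_⟩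
        simp only [is_valid_move, beq_iff_eq]
        rw [hcq, hc]
      · exact hd1


theorem pvDfs_spec (m : List (List Int)) :
    ∀ (fuel : Nat) (x y h : Int) (v : List (Int × Int)),
    pvCell m x y = h → h ≤ 9 → (9 - h).toNat < fuel →
    ∃ w : List (Int × Int),
      pvDfs m fuel x y h v
        = (((w.filter (fun c => pvCell m c.1 c.2 == 9)).length : Int), v ++ w) ∧
      (∀ c, c ∈ w ↔ pvAR m v (x, y) c) ∧ w.Nodup := by
  intro fuel
  induction fuel with
  | zero => intro x y h v _ _ hf; exact absurd hf (Nat.not_lt_zero _)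
  | succ fuel ihf =>
    intro x y h v hc h9 hf
    by_cases hv : (x, y) ∈ v
    · refine ⟨[], by simp [pvDfs, hv], fun c => ?_, List.nodup_nil⟩
      simp only [List.not_mem_nil, false_iff]
      intro har; exact pvAR_start_not_mem har hv
    · have hadd : PySem.Set.add v (x, y) = v ++ [(x, y)] := by
        simp [PySem.Set.add, PySem.Set.contains, hv]
      by_cases h9c : h = 9
      · -- the cell is a 9: dfs marks it and returns 1
        subst h9c
        refine ⟨[(x, y)], ?_, fun c => ?_, by simp⟩
        · simp [pvDfs, hv, hc]
        · simp only [List.mem_cons, List.not_mem_nil, or_false]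
          constructor
          · rintro rfl; exact pvAR.refl _ hv
          · intro har; exact pvAR_single (by simpa using hc) c har
      · -- interior cell: run the direction fold
        have hlt : h < 9 := lt_of_le_of_ne h9 h9c
        have hneq : ¬((pvCell m x y == 9) = true) := by simp [hc, h9c]
        have hrun : pvDfs m (fuel + 1) x y h v
            = List.foldl (pvBody m fuel x y h) (0, (v ++ [(x, y)]) ++ []) pvDirs := by
          simp only [pvDfs, hadd]
          rw [if_neg hv, if_neg hneq, List.append_nil]
          rfl
        obtain ⟨u', hfold, hnd', hxu', hnv', har', hclose'⟩ :=
          pvDfs_fold m fuel ihf x y h v hv hc hlt hf pvDirs (fun d hd => hd) 0 []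
            List.nodup_nil List.not_mem_nil (by simp) (by simp)
            (by
              intro p q hp he hqv hq
              rcases List.mem_cons.1 hp with h1 | h1
              · exact ⟨h1, mem_nbrs_dir (h1 ▸ he.2.1)⟩
              · exact absurd h1 List.not_mem_nil)
            rfl
        refine ⟨(x, y) :: u', ?_, fun c => ?_, List.nodup_cons.mpr ⟨hxu', hnd'⟩⟩
        · rw [hrun, hfold]
          simp [hc, h9c]
        · rw [List.mem_cons]
          constructor
          · rintro (rfl | hcm)
            · exact pvAR.refl _ hv
            · exact har' c hcm
          · intro har
            have := pvAR_closed (R := (x, y) :: u') List.mem_cons_self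
              (fun p q hp he hqv => hclose' p q hp he hqv) c har
            simpa using this

-- ===== B side: characterisation of the frontier iteration =====

theorem pvStep_spec (m : List (List Int)) (s : Int × Int) (k : Nat) (f : List (Int × Int))
    (hf : ∀ c, c ∈ f ↔ pvLv m s k c) :
    (∀ c, c ∈ pvStep m (rowsOf m) (colsOf m) ((k : Int) + 1) f ↔ pvLv m s (k + 1) c)
      ∧ (pvStep m (rowsOf m) (colsOf m) ((k : Int) + 1) f).Nodup := by
  refine ⟨fun c => ?_, PySem.Set.nodup_ofList _⟩
  unfold pvStep
  rw [PySem.Set.mem_ofList]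
  simp only [List.mem_flatMap, List.mem_filter, Bool.and_eq_true, decide_eq_true_eq, beq_iff_eq]
  constructor
  · rintro ⟨p, hp, hn, ⟨⟨⟨⟨h1, h2⟩, h3⟩, h4⟩, h5⟩⟩
    exact pvLv.succ ((hf p).1 hp) hn ⟨h1, h2, h3, h4⟩ h5
  · intro hl
    cases hl with
    | succ h1 h2 h3 h4 =>
      rename_i p
      obtain ⟨b1, b2, b3, b4⟩ := h3
      exact ⟨p, (hf p).2 h1, h2, ⟨⟨⟨⟨b1, b2⟩, b3⟩, b4⟩, h4⟩⟩

theorem pvFrontier_spec (m : List (List Int)) (s : Int × Int) :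
    ∃ f : List (Int × Int),
      (PySem.List.pyRange 1 10 1).foldl
          (fun f h => pvStep m (rowsOf m) (colsOf m) h f) (PySem.Set.ofList [s]) = f ∧
      f.Nodup ∧ (∀ c, c ∈ f ↔ pvLv m s 9 c) := by
  have aux : ∀ j : Nat,
      ∃ f : List (Int × Int),
        (PySem.List.pyRange 1 ((j : Int) + 1) 1).foldl
            (fun f h => pvStep m (rowsOf m) (colsOf m) h f) (PySem.Set.ofList [s]) = f ∧
        f.Nodup ∧ (∀ c, c ∈ f ↔ pvLv m s j c) := by
    intro j
    induction j with
    | zero =>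
      refine ⟨PySem.Set.ofList [s], ?_, PySem.Set.nodup_ofList _, fun c => ?_⟩
      · rw [show ((0 : Nat) : Int) + 1 = 1 by norm_num, PySem.List.pyRange_one_eq_nil le_rfl]
        rfl
      · rw [PySem.Set.mem_ofList]
        simp only [List.mem_singleton]
        constructor
        · rintro rfl; exact pvLv.zero
        · intro h; cases h; rfl
    | succ j ih =>
      obtain ⟨f, hfold, hnd, hmem⟩ := ih
      obtain ⟨hmem', hnd'⟩ := pvStep_spec m s j f hmem
      refine ⟨_, ?_, hnd', hmem'⟩
      rw [show ((j + 1 : Nat) : Int) + 1 = ((j : Int) + 1) + 1 by push_cast; ring,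
        PySem.List.pyRange_one_succ_right (by omega : (1 : Int) ≤ (j : Int) + 1),
        List.foldl_append, hfold]
      rfl
  have h9 := aux 9
  rwa [show ((9 : Nat) : Int) + 1 = 10 by norm_num] at h9

-- ===== bridge =====

theorem pvLv_cell {m s k c} (hs : pvCell m s.1 s.2 = 0) (h : pvLv m s k c) :
    pvCell m c.1 c.2 = (k : Int) := by
  induction h with
  | zero => simpa using hs
  | succ h1 h2 h3 h4 ih => push_cast; simpa using h4

theorem pvAR_to_pvLv {m s c} (hs : pvCell m s.1 s.2 = 0) (h : pvAR m [] s c) :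
    pvLv m s (pvCell m c.1 c.2).toNat c := by
  induction h with
  | refl hp =>
    rw [show (pvCell m s.1 s.2).toNat = 0 by rw [hs]; rfl]
    exact pvLv.zero
  | step h1 h2 h3 ih =>
    rename_i p q
    obtain ⟨hne, hn, hinb, hcell⟩ := h2
    have hp := pvLv_cell hs ih
    have h4 : pvCell m q.1 q.2 = ((pvCell m p.1 p.2).toNat : Int) + 1 := by
      rw [hcell]; omega
    have htn : (pvCell m q.1 q.2).toNat = (pvCell m p.1 p.2).toNat + 1 := by omega
    rw [htn]
    exact pvLv.succ ih hn hinb h4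

theorem pvLv_to_pvAR {m s c k} (hs : pvCell m s.1 s.2 = 0) (h : pvLv m s k c) (hk : k ≤ 9) :
    pvAR m [] s c := by
  induction h with
  | zero => exact pvAR.refl s (by simp)
  | succ h1 h2 h3 h4 ih =>
    rename_i k p q
    have hcp := pvLv_cell hs h1
    refine pvAR.step (ih (by omega)) ⟨?_, h2, h3, ?_⟩ (by simp)
    · rw [hcp]; intro hc; omega
    · rw [h4, hcp]

-- per-trailhead agreement
theorem pvTrailhead_eq (m : List (List Int)) (x y : Int) (h0 : pvCell m x y = 0) :
    (pvDfs m 11 x y 0 PySem.Set.empty).1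
      = (((PySem.List.pyRange 1 10 1).foldl
          (fun f h => pvStep m (rowsOf m) (colsOf m) h f)
          (PySem.Set.ofList [(x, y)])).length : Int) := by
  obtain ⟨w, heq, hmem, hnd⟩ :=
    pvDfs_spec m 11 x y 0 PySem.Set.empty h0 (by norm_num) (by norm_num)
  obtain ⟨f, hfold, hfnd, hfmem⟩ := pvFrontier_spec m (x, y)
  rw [heq, hfold]
  have hperm : (w.filter (fun c => pvCell m c.1 c.2 == 9)).Perm f := by
    rw [List.perm_ext_iff_of_nodup (List.Nodup.filter _ hnd) hfnd]
    intro c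
    rw [List.mem_filter, hfmem c, hmem c]
    simp only [beq_iff_eq]
    constructor
    · rintro ⟨har, h9⟩
      have := pvAR_to_pvLv h0 har
      rwa [h9, show ((9 : Int)).toNat = 9 by rfl] at this
    · intro hlv
      refine ⟨pvLv_to_pvAR h0 hlv le_rfl, ?_⟩
      have := pvLv_cell h0 hlv
      rwa [show (((9 : Nat)) : Int) = 9 by norm_num] at this
  rw [hperm.length_eq]

-- ===== VERDICT (by name: the statement is the Claim_ definition above) =====
theorem calculate_trailhead_scores_spec : Claim_equal_calculate_trailhead_scores := by
  intro m _ _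
  unfold Spec_calculate_trailhead_scores
  unfold calculate_trailhead_scores calculate_trailhead_scores_alt
  apply PySem.List.foldl_congr_mem
  intro acc x _
  apply PySem.List.foldl_congr_mem
  intro acc' y _
  by_cases h0 : pvCell m x y == 0
  · rw [if_pos h0, if_pos h0, pvTrailhead_eq m x y (by simpa using h0)]; rfl
  · rw [if_neg h0, if_neg h0]
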